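-- pv_equiv track=rewrite | github.com/tryap1/Sorting-Visualisation | selection.py | color_array
-- ===== SOURCE A (Python) =====
-- def color_array(data_length,i,j):
--     color = []
--
--     for x in range(data_length):
--         if x == i:
--             color.append('#F1948A')
--
--         elif x == j:
--             color.append('#F7DC6F')
--
--         else:
--             color.append('#E8DAEF')
--
--     return color
-- ===== SOURCE B (Python) =====
-- def color_array(data_length, i, j):
--     # Run-length construction: compute the (at most two) highlighted positions as
--     # events, sort them, and emit plain-colored runs between them.
--     n = data_length if data_length > 0 else 0
--     marks = []
--     if 0 <= i < n:
--         marks.append((i, '#F1948A'))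
--     if 0 <= j < n and j != i:
--         marks.append((j, '#F7DC6F'))
--     marks.sort(key=lambda t: t[0])
--     out = []
--     prev = 0
--     for p, c in marks:
--         out.extend(['#E8DAEF'] * (p - prev))
--         out.append(c)
--         prev = p + 1
--     out.extend(['#E8DAEF'] * (n - prev))
--     return out
-- ===== Notes on version B (the rewrite author's own statement) =====
-- stated objective: alternative
-- what changed: B uses a run-length/event construction: it collects the at-most-two valid highlight positions as (position, color) events, sorts them, and concatenates plain-colored runs between the events, instead of A's per-element if/elif branch inside a loop over every index.
import Mathlib
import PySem

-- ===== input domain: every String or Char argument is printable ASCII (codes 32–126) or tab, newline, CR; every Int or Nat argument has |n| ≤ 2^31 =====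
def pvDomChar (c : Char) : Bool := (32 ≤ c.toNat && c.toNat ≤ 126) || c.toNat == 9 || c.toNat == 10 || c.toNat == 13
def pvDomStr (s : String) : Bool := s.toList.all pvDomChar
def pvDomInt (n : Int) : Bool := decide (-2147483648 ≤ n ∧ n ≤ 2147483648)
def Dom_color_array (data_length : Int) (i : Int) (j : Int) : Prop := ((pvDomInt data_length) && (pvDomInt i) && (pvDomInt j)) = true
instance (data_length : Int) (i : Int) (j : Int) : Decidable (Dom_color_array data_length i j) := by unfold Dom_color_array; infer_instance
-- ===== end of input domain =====

-- B builds the list by run-length construction: it collects the (at most two) highlight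
-- positions as sorted events and emits plain-colored runs between them, instead of
-- A's per-element branching loop; objective: alternative.

-- ===== PORT A =====
def color_array (data_length : Int) (i : Int) (j : Int) : List String :=
  (PySem.List.pyRange 0 data_length 1).foldl
    (fun color x =>
      if x == i then color ++ ["#F1948A"]
      else if x == j then color ++ ["#F7DC6F"]
      else color ++ ["#E8DAEF"]) []

-- ===== PORT B =====
def color_array_alt (data_length : Int) (i : Int) (j : Int) : List String :=
  let n : Int := if data_length > 0 then data_length else 0
  let marks : List (Int × String) := []
  let marks := if 0 ≤ i ∧ i < n then marks ++ [(i, "#F1948A")] else marks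
  let marks := if (0 ≤ j ∧ j < n) ∧ j ≠ i then marks ++ [(j, "#F7DC6F")] else marks
  let marks := PySem.List.sorted marks (fun t => t.1) false
  let step := marks.foldl
    (fun (acc : List String × Int) pc =>
      (acc.1 ++ List.replicate (pc.1 - acc.2).toNat "#E8DAEF" ++ [pc.2], pc.1 + 1))
    ([], 0)
  step.1 ++ List.replicate (n - step.2).toNat "#E8DAEF"

-- ===== PRECONDITION & SPEC =====
def Spec_color_array (data_length : Int) (i : Int) (j : Int) (out : List String) : Prop := out = color_array_alt data_length i j
instance (data_length : Int) (i : Int) (j : Int) (out : List String) : Decidable (Spec_color_array data_length i j out) := by unfold Spec_color_array; infer_instance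

-- ===== CLAIM (what is proved, stated in full; the proofs are below) =====
def Claim_equal_color_array : Prop := ∀ (data_length : Int) (i : Int) (j : Int), Dom_color_array data_length i j → Spec_color_array data_length i j (color_array data_length i j)

-- ===== LEMMAS AND PROOFS =====

-- A's loop is the map of the highlight choice over range(data_length)
theorem color_array_eq_map (n i j : Int) :
    color_array n i j = (List.range (max n 0).toNat).map
      (fun (k : Nat) => if (k : Int) = i then "#F1948A" else if (k : Int) = j then "#F7DC6F" else "#E8DAEF") := by
  unfold color_array
  have hf : (fun (color : List String) (x : Int) =>
      if x == i then color ++ ["#F1948A"]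
      else if x == j then color ++ ["#F7DC6F"]
      else color ++ ["#E8DAEF"])
      = (fun (color : List String) (x : Int) => color ++
          [if x = i then "#F1948A" else if x = j then "#F7DC6F" else "#E8DAEF"]) := by
    funext c x; split_ifs <;> simp_all
  rw [hf, PySem.List.foldl_append_singleton_eq_map, PySem.List.pyRange_one, List.map_map]
  have hm : (n - 0).toNat = (max n 0).toNat := by omega
  rw [hm]
  simp

-- one highlighted position, as runs
theorem map_range_one_point (N p : Nat) (hp : p < N) (c d : String) :
    (List.range N).map (fun k => if k = p then c else d)
      = List.replicate p d ++ c :: List.replicate (N - p - 1) d := by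
  apply List.ext_getElem
  · simp; omega
  · intro k hk1 hk2
    simp only [List.getElem_map, List.getElem_range, List.getElem_append,
      List.getElem_cons, List.getElem_replicate, List.length_replicate]
    split_ifs <;> first | rfl | omega

-- two highlighted positions p < q, as runs
theorem map_range_two_points (N p q : Nat) (hpq : p < q) (hq : q < N) (c1 c2 d : String) :
    (List.range N).map (fun k => if k = p then c1 else if k = q then c2 else d)
      = List.replicate p d ++ c1 :: (List.replicate (q - p - 1) d ++ c2 :: List.replicate (N - q - 1) d) := by
  apply List.ext_getElem
  · simp; omega
  · intro k hk1 hk2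
    simp only [List.getElem_map, List.getElem_range, List.getElem_append,
      List.getElem_cons, List.getElem_replicate, List.length_replicate]
    split_ifs <;> first | rfl | omega
-- fold of B over an explicit mark list (unfolds the two concrete shapes)
theorem alt_foldl_nil :
    (([] : List (Int × String)).foldl
      (fun (acc : List String × Int) pc =>
        (acc.1 ++ List.replicate (pc.1 - acc.2).toNat "#E8DAEF" ++ [pc.2], pc.1 + 1))
      ([], 0)) = ([], 0) := rfl

-- pointwise bridges between A's Int-compared chooser and the Nat-indexed one
theorem point_two (i j : Int) (k : Nat) (hi : 0 ≤ i) (hj : 0 ≤ j) (a b c : String) :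
    (if (k : Int) = i then a else if (k : Int) = j then b else c)
      = (if k = i.toNat then a else if k = j.toNat then b else c) := by
  have e1 : ((k : Int) = i) ↔ (k = i.toNat) := by omega
  have e2 : ((k : Int) = j) ↔ (k = j.toNat) := by omega
  simp only [e1, e2]

theorem point_one_i (n i j : Int) (k : Nat) (hk : (k : Int) < n) (hi : 0 ≤ i)
    (hj : ¬((0 ≤ j ∧ j < n) ∧ j ≠ i)) (a b c : String) :
    (if (k : Int) = i then a else if (k : Int) = j then b else c)
      = (if k = i.toNat then a else c) := by
  have e1 : ((k : Int) = i) ↔ (k = i.toNat) := by omega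
  by_cases h1 : (k : Int) = i
  · rw [if_pos h1, if_pos (e1.mp h1)]
  · have h2 : (k : Int) ≠ j := by omega
    rw [if_neg h1, if_neg h2, if_neg (fun hh => h1 (e1.mpr hh))]

theorem point_one_j (n i j : Int) (k : Nat) (hk : (k : Int) < n)
    (hi : ¬(0 ≤ i ∧ i < n)) (hj : 0 ≤ j) (a b c : String) :
    (if (k : Int) = i then a else if (k : Int) = j then b else c)
      = (if k = j.toNat then b else c) := by
  have e2 : ((k : Int) = j) ↔ (k = j.toNat) := by omega
  have h1 : (k : Int) ≠ i := by omega
  rw [if_neg h1]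
  simp only [e2]

theorem point_none (n i j : Int) (k : Nat) (hk : (k : Int) < n)
    (hi : ¬(0 ≤ i ∧ i < n)) (hj : ¬((0 ≤ j ∧ j < n) ∧ j ≠ i)) (a b c : String) :
    (if (k : Int) = i then a else if (k : Int) = j then b else c) = c := by
  have h1 : (k : Int) ≠ i := by omega
  have h2 : (k : Int) ≠ j := by omega
  rw [if_neg h1, if_neg h2]

-- ===== VERDICT (by name: the statement is the Claim_ definition above) =====
theorem color_array_spec : Claim_equal_color_array := by
  intro n i j _
  unfold Spec_color_array
  rw [color_array_eq_map]
  unfold color_array_alt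
  dsimp only
  by_cases hn : n > 0
  · have he : (if n > 0 then n else 0) = n := if_pos hn
    rw [he]
    have hN : (max n 0).toNat = n.toNat := by omega
    rw [hN]
    by_cases hi : 0 ≤ i ∧ i < n
    · by_cases hj : (0 ≤ j ∧ j < n) ∧ j ≠ i
      · -- both highlights present, i ≠ j
        rw [if_pos hi, if_pos hj]
        simp only [List.nil_append, List.singleton_append]
        rw [List.map_congr_left
          (g := fun (k : Nat) => if k = i.toNat then "#F1948A" else if k = j.toNat then "#F7DC6F" else "#E8DAEF")
          (fun k hk => point_two i j k hi.1 hj.1.1 _ _ _)]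
        rcases lt_or_gt_of_ne (Ne.symm hj.2) with hij | hij
        · -- i < j : marks stay in order
          rw [show PySem.List.sorted [(i, "#F1948A"), (j, "#F7DC6F")] (fun t => t.1) false
                = [(i, "#F1948A"), (j, "#F7DC6F")] from by
            apply PySem.List.sorted_eq_self_of_pairwise
            constructor
            · intro b hb; simp at hb; subst hb; exact hij.le
            · exact List.pairwise_singleton _ _]
          simp only [List.foldl_cons, List.foldl_nil, List.nil_append]
          rw [map_range_two_points n.toNat i.toNat j.toNat (by omega) (by omega)]
          have h1 : (i - 0).toNat = i.toNat := by omega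
          have h2 : (j - (i + 1)).toNat = j.toNat - i.toNat - 1 := by omega
          have h3 : (n - (j + 1)).toNat = n.toNat - j.toNat - 1 := by omega
          rw [h1, h2, h3]
          simp
        · -- j < i : sorting swaps the two marks
          rw [show PySem.List.sorted [(i, "#F1948A"), (j, "#F7DC6F")] (fun t => t.1) false
                = [(j, "#F7DC6F"), (i, "#F1948A")] from by
            simp [PySem.List.sorted_eq_foldl_insertBy, PySem.List.insertBy, hij]]
          simp only [List.foldl_cons, List.foldl_nil, List.nil_append]
          rw [show (fun (k : Nat) => if k = i.toNat then "#F1948A" else if k = j.toNat then "#F7DC6F" else "#E8DAEF")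
                = (fun (k : Nat) => if k = j.toNat then "#F7DC6F" else if k = i.toNat then "#F1948A" else "#E8DAEF") from by
            funext k
            by_cases h1 : k = i.toNat <;> by_cases h2 : k = j.toNat <;> simp [h1, h2] <;> omega]
          rw [map_range_two_points n.toNat j.toNat i.toNat (by omega) (by omega)]
          have h1 : (j - 0).toNat = j.toNat := by omega
          have h2 : (i - (j + 1)).toNat = i.toNat - j.toNat - 1 := by omega
          have h3 : (n - (i + 1)).toNat = n.toNat - i.toNat - 1 := by omega
          rw [h1, h2, h3]
          simp
      · -- only i highlighted (j out of range or j = i)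
        rw [if_pos hi, if_neg hj]
        simp only [List.nil_append]
        rw [show PySem.List.sorted [(i, "#F1948A")] (fun t => t.1) false = [(i, "#F1948A")] from by
          apply PySem.List.sorted_eq_self_of_pairwise
          exact List.pairwise_singleton _ _]
        simp only [List.foldl_cons, List.foldl_nil, List.nil_append]
        rw [List.map_congr_left
          (g := fun (k : Nat) => if k = i.toNat then "#F1948A" else "#E8DAEF")
          (fun k hk => point_one_i n i j k (by simp at hk; omega) hi.1 hj _ _ _)]
        rw [map_range_one_point n.toNat i.toNat (by omega)]
        have h1 : (i - 0).toNat = i.toNat := by omega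
        have h2 : (n - (i + 1)).toNat = n.toNat - i.toNat - 1 := by omega
        rw [h1, h2]
        simp
    · by_cases hj : (0 ≤ j ∧ j < n) ∧ j ≠ i
      · -- only j highlighted
        rw [if_neg hi, if_pos hj]
        simp only [List.nil_append]
        rw [show PySem.List.sorted [(j, "#F7DC6F")] (fun t => t.1) false = [(j, "#F7DC6F")] from by
          apply PySem.List.sorted_eq_self_of_pairwise
          exact List.pairwise_singleton _ _]
        simp only [List.foldl_cons, List.foldl_nil, List.nil_append]
        rw [List.map_congr_left
          (g := fun (k : Nat) => if k = j.toNat then "#F7DC6F" else "#E8DAEF")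
          (fun k hk => point_one_j n i j k (by simp at hk; omega) hi hj.1.1 _ _ _)]
        rw [map_range_one_point n.toNat j.toNat (by omega)]
        have h1 : (j - 0).toNat = j.toNat := by omega
        have h2 : (n - (j + 1)).toNat = n.toNat - j.toNat - 1 := by omega
        rw [h1, h2]
        simp
      · -- no highlight in range
        rw [if_neg hi, if_neg hj]
        rw [show PySem.List.sorted ([] : List (Int × String)) (fun t => t.1) false = [] from by
          apply PySem.List.sorted_eq_self_of_pairwise
          exact List.Pairwise.nil]
        rw [alt_foldl_nil]
        rw [List.map_congr_left (g := fun (_ : Nat) => "#E8DAEF")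
          (fun k hk => point_none n i j k (by simp at hk; omega) hi hj _ _ _)]
        rw [List.map_const']
        simp only [List.length_range]
        congr 1
        omega
  · -- n ≤ 0 : empty output
    have he : (if n > 0 then n else 0) = 0 := if_neg hn
    rw [he]
    have hN : (max n 0).toNat = 0 := by omega
    rw [hN]
    have hi : ¬ (0 ≤ i ∧ i < (0 : Int)) := by omega
    have hj : ¬ ((0 ≤ j ∧ j < (0 : Int)) ∧ j ≠ i) := by
      intro h; omega
    rw [if_neg hi, if_neg hj]
    rw [show PySem.List.sorted ([] : List (Int × String)) (fun t => t.1) false = [] from by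
      apply PySem.List.sorted_eq_self_of_pairwise
      exact List.Pairwise.nil]
    rw [alt_foldl_nil]
    simp
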